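-- pv_equiv track=rewrite | github.com/apple/pfl-research | pfl/data/sampling.py | assign_silo_to_process
-- ===== SOURCE A (Python) =====
-- import itertools
-- from collections import defaultdict
--
-- def assign_silo_to_process(num_silos, num_nodes, num_local_processes):
--     process_to_silos = defaultdict(list)
--     assert num_silos >= num_nodes
--     # Each node holds one or multiple silos
--     node_to_silos = defaultdict(list)
--     # Assign silo to node
--     for node, silo in zip(
--             itertools.islice(itertools.cycle(range(num_nodes)), num_silos),
--             range(num_silos)):
--         node_to_silos[node].append(silo)
--     # For each node and the silos, assign silo to local process
--     for node in range(num_nodes):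
--         node_silos = node_to_silos[node]
--         n = max(len(node_silos), num_local_processes)
--         for silo, local_rank in zip(
--                 itertools.islice(itertools.cycle(node_silos), n),
--                 itertools.islice(
--                     itertools.cycle(range(num_local_processes)), n)):
--             global_rank = node * num_local_processes + local_rank
--             process_to_silos[global_rank].append(silo)
--     return process_to_silos
-- ===== SOURCE B (Python) =====
-- from collections import defaultdict
--
--
-- def assign_silo_to_process(num_silos, num_nodes, num_local_processes):
--     assert num_silos >= num_nodes
--     assert num_silos >= 0
--     process_to_silos = defaultdict(list)
--     for node in range(num_nodes):
--         # silos on this node are node, node+num_nodes, ...: m = ceil((num_silos-node)/num_nodes)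
--         m = -((node - num_silos) // num_nodes)
--         n = max(m, num_local_processes)
--         for local in range(num_local_processes):
--             # process (node, local) receives rounds local, local+P, local+2P, ... < n
--             count = -((local - n) // num_local_processes)
--             process_to_silos[node * num_local_processes + local] = [
--                 node + ((local + j * num_local_processes) % m) * num_nodes
--                 for j in range(count)]
--     return process_to_silos
-- ===== Notes on version B (the rewrite author's own statement) =====
-- stated objective: alternative
-- what changed: Replaces A's two scatter passes (round-robin silo-to-node scatter into a node_to_silos dict, then a zipped cycle/islice scatter appending silos one round at a time into process lists) by a direct per-process gather: each process's whole silo list is computed in closed form (counts via ceiling division, silo ids via modular arithmetic), with no intermediate dict and no append loop.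
import Mathlib
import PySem

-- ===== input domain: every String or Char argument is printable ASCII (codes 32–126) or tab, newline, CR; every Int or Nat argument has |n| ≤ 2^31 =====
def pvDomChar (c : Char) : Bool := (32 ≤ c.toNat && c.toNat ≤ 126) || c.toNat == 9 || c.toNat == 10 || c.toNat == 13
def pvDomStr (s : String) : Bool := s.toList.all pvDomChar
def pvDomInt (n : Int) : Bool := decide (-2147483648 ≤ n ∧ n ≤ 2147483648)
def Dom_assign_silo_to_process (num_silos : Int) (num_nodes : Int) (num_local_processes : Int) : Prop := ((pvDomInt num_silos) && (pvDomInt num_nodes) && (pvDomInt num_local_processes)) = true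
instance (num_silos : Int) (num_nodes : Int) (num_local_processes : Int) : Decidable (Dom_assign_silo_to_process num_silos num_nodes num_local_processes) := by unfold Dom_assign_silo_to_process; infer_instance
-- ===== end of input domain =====

-- B replaces A's per-silo round-robin scatter into dicts by a direct closed-form gather: each
-- process's silo list is computed arithmetically in one shot (no intermediate node_to_silos dict,
-- no per-round append loop) — objective: alternative decomposition, same values.

-- ===== PORT A =====
-- zip(islice(cycle(range(num_nodes)), num_silos), range(num_silos)): when num_nodes ≤ 0 the cycle is
-- empty so the zip yields nothing; otherwise silo i is paired with node i % num_nodes (exact hand port).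
def assign_silo_to_process (num_silos : Int) (num_nodes : Int) (num_local_processes : Int) : List (Int × List Int) :=
  let pairs1 : List (Int × Int) :=
    if num_nodes ≤ 0 then []
    else (PySem.List.pyRange 0 num_silos 1).map (fun silo => (PySem.Int.mod silo num_nodes, silo))
  let node_to_silos : PySem.Dict Int (List Int) :=
    pairs1.foldl (fun d p => d.modify p.1 [] (fun l => l ++ [p.2])) PySem.Dict.empty
  let process_to_silos : PySem.Dict Int (List Int) :=
    (PySem.List.pyRange 0 num_nodes 1).foldl (fun d node =>
      let node_silos := node_to_silos.getD node []
      let n : Int := max (node_silos.length : Int) num_local_processes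
      -- zip(islice(cycle(node_silos), n), islice(cycle(range(num_local_processes)), n)):
      -- empty when either cycled sequence is empty, else step i gives
      -- (node_silos[i % len(node_silos)], i % num_local_processes) (exact hand port).
      let pairs2 : List (Int × Int) :=
        if node_silos.isEmpty || num_local_processes ≤ 0 then []
        else (PySem.List.pyRange 0 n 1).map (fun i =>
          ((PySem.List.pyGet? node_silos (PySem.Int.mod i (node_silos.length : Int))).getD 0,
            PySem.Int.mod i num_local_processes))
      pairs2.foldl (fun d q => d.modify (node * num_local_processes + q.2) [] (fun l => l ++ [q.1])) d)
      PySem.Dict.empty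
  process_to_silos.items

-- ===== PORT B =====
def assign_silo_to_process_alt (num_silos : Int) (num_nodes : Int) (num_local_processes : Int) : List (Int × List Int) :=
  ((PySem.List.pyRange 0 num_nodes 1).foldl (fun d node =>
    let m : Int := -(PySem.Int.floordiv (node - num_silos) num_nodes)
    let n : Int := max m num_local_processes
    (PySem.List.pyRange 0 num_local_processes 1).foldl (fun d loc =>
      let count : Int := -(PySem.Int.floordiv (loc - n) num_local_processes)
      d.insert (node * num_local_processes + loc)
        ((PySem.List.pyRange 0 count 1).map (fun j =>
          node + (PySem.Int.mod (loc + j * num_local_processes) m) * num_nodes))) d)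
    PySem.Dict.empty).items

-- ===== PRECONDITION & SPEC =====
-- Pre_ excludes exactly the inputs where A raises: the assert fires when num_silos < num_nodes, and
-- islice raises ValueError when num_silos < 0 (B's own input asserts raise on the same inputs).
def Pre_assign_silo_to_process (num_silos : Int) (num_nodes : Int) (num_local_processes : Int) : Prop :=
  num_nodes ≤ num_silos ∧ 0 ≤ num_silos

instance (num_silos : Int) (num_nodes : Int) (num_local_processes : Int) : Decidable (Pre_assign_silo_to_process num_silos num_nodes num_local_processes) := by unfold Pre_assign_silo_to_process; infer_instance

def pvWitness_assign_silo_to_process : Int × Int × Int := (5, 2, 2)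

def Spec_assign_silo_to_process (num_silos : Int) (num_nodes : Int) (num_local_processes : Int) (out : List (Int × List Int)) : Prop := out = assign_silo_to_process_alt num_silos num_nodes num_local_processes
instance (num_silos : Int) (num_nodes : Int) (num_local_processes : Int) (out : List (Int × List Int)) : Decidable (Spec_assign_silo_to_process num_silos num_nodes num_local_processes out) := by unfold Spec_assign_silo_to_process; infer_instance

-- ===== CLAIM (what is proved, stated in full; the proofs are below) =====
def Claim_equal_assign_silo_to_process : Prop := ∀ (num_silos : Int) (num_nodes : Int) (num_local_processes : Int), Dom_assign_silo_to_process num_silos num_nodes num_local_processes → Pre_assign_silo_to_process num_silos num_nodes num_local_processes → Spec_assign_silo_to_process num_silos num_nodes num_local_processes (assign_silo_to_process num_silos num_nodes num_local_processes)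

-- ===== LEMMAS AND PROOFS =====

-- A's outer loop body (with node_to_silos inlined, as the port's lets reduce to).
def pvStepA (num_silos num_nodes num_local_processes : Int)
    (d : PySem.Dict Int (List Int)) (node : Int) : PySem.Dict Int (List Int) :=
  let pairs1 : List (Int × Int) :=
    if num_nodes ≤ 0 then []
    else (PySem.List.pyRange 0 num_silos 1).map (fun silo => (PySem.Int.mod silo num_nodes, silo))
  let node_to_silos : PySem.Dict Int (List Int) :=
    pairs1.foldl (fun d p => d.modify p.1 [] (fun l => l ++ [p.2])) PySem.Dict.empty
  let node_silos := node_to_silos.getD node []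
  let n : Int := max (node_silos.length : Int) num_local_processes
  let pairs2 : List (Int × Int) :=
    if node_silos.isEmpty || num_local_processes ≤ 0 then []
    else (PySem.List.pyRange 0 n 1).map (fun i =>
      ((PySem.List.pyGet? node_silos (PySem.Int.mod i (node_silos.length : Int))).getD 0,
        PySem.Int.mod i num_local_processes))
  pairs2.foldl (fun d q => d.modify (node * num_local_processes + q.2) [] (fun l => l ++ [q.1])) d

-- B's outer loop body.
def pvStepB (num_silos num_nodes num_local_processes : Int)
    (d : PySem.Dict Int (List Int)) (node : Int) : PySem.Dict Int (List Int) :=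
  let m : Int := -(PySem.Int.floordiv (node - num_silos) num_nodes)
  let n : Int := max m num_local_processes
  (PySem.List.pyRange 0 num_local_processes 1).foldl (fun d loc =>
    let count : Int := -(PySem.Int.floordiv (loc - n) num_local_processes)
    d.insert (node * num_local_processes + loc)
      ((PySem.List.pyRange 0 count 1).map (fun j =>
        node + (PySem.Int.mod (loc + j * num_local_processes) m) * num_nodes))) d

theorem portA_eq (num_silos num_nodes num_local_processes : Int) :
    assign_silo_to_process num_silos num_nodes num_local_processes
      = ((PySem.List.pyRange 0 num_nodes 1).foldl
          (pvStepA num_silos num_nodes num_local_processes) PySem.Dict.empty).items := rfl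

theorem portB_eq (num_silos num_nodes num_local_processes : Int) :
    assign_silo_to_process_alt num_silos num_nodes num_local_processes
      = ((PySem.List.pyRange 0 num_nodes 1).foldl
          (pvStepB num_silos num_nodes num_local_processes) PySem.Dict.empty).items := rfl

-- Strictly increasing lists with the same members are equal.
theorem eq_of_pairwise_lt_of_mem_iff (l1 l2 : List Int)
    (h1 : l1.Pairwise (· < ·)) (h2 : l2.Pairwise (· < ·))
    (hm : ∀ x, x ∈ l1 ↔ x ∈ l2) : l1 = l2 := by
  have p : l2.Perm l1 := by
    apply List.perm_of_nodup_nodup_toFinset_eq (h2.imp ne_of_lt) (h1.imp ne_of_lt)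
    ext x; simp [hm x]
  exact (List.Perm.eq_of_pairwise (fun a b _ _ h h2 => absurd h2 (not_lt.mpr h.le)) h2 h1 p).symm

theorem pairwise_lt_pyRange (a b s : Int) (hs : 0 < s) :
    (PySem.List.pyRange a b s).Pairwise (· < ·) := by
  rw [PySem.List.pyRange_of_pos a b hs]
  refine List.pairwise_map.mpr (List.pairwise_lt_range.imp ?_)
  intro i j hij
  have : (s:Int) * i < s * j := by
    apply mul_lt_mul_of_pos_left _ hs; exact_mod_cast hij
  omega

-- The round-robin scatter's bucket of node is exactly range(node, num_silos, num_nodes).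
theorem bucket_eq (num_silos num_nodes node : Int) (hn : 0 < num_nodes)
    (h0 : 0 ≤ node) (h1 : node < num_nodes) :
    (((PySem.List.pyRange 0 num_silos 1).map (fun silo => (PySem.Int.mod silo num_nodes, silo))).foldl
        (fun d p => d.modify p.1 [] (fun l => l ++ [p.2])) (PySem.Dict.empty : PySem.Dict Int (List Int))).getD node []
      = PySem.List.pyRange node num_silos num_nodes := by
  rw [PySem.Dict.getD_foldl_modify_append]
  rw [List.filter_map, List.map_map]
  have hfm : ∀ l : List Int, (l.filter
      ((fun p : Int × Int => p.1 == node) ∘ fun silo => (PySem.Int.mod silo num_nodes, silo))).map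
      ((·.2) ∘ fun silo : Int => ((PySem.Int.mod silo num_nodes : Int), silo))
      = l.filter (fun s => PySem.Int.mod s num_nodes == node) := by
    intro l; induction l with
    | nil => rfl
    | cons a l ih =>
      by_cases h : PySem.Int.mod a num_nodes == node <;>
        simp [h, Function.comp, ih]
  rw [hfm]
  have hempty : (PySem.Dict.empty : PySem.Dict Int (List Int)).getD node [] = [] := by rfl
  rw [hempty, List.nil_append]
  apply eq_of_pairwise_lt_of_mem_iff
  · exact (pairwise_lt_pyRange 0 num_silos 1 one_pos).filter _
  · exact pairwise_lt_pyRange node num_silos num_nodes hn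
  · intro x
    simp only [List.mem_filter, PySem.List.mem_pyRange_iff_of_pos one_pos,
      PySem.List.mem_pyRange_iff_of_pos hn, PySem.Int.mod_eq_emod_of_pos hn, beq_iff_eq]
    constructor
    · rintro ⟨⟨hx0, hxs, -⟩, hmod⟩
      have hd : num_nodes ∣ x - node := by
        refine ⟨x / num_nodes, ?_⟩
        have := Int.emod_def x num_nodes
        omega
      have hq : 0 ≤ x / num_nodes := Int.ediv_nonneg hx0 hn.le
      have hge : node ≤ x := by
        have := Int.emod_def x num_nodes
        nlinarith [mul_nonneg hn.le hq]
      exact ⟨hge, hxs, hd⟩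
    · rintro ⟨hge, hxs, ⟨t, ht⟩⟩
      have hx : x = node + num_nodes * t := by omega
      refine ⟨⟨by omega, hxs, one_dvd _⟩, ?_⟩
      rw [hx, Int.add_mul_emod_self_left]
      exact Int.emod_eq_of_lt h0 h1

-- ceiling division: -((-a) // b) = (a + b - 1) / b for 0 < b.
theorem neg_ediv_neg_eq (a b : Int) (hb : 0 < b) : -((-a)/b) = (a+b-1)/b := by
  have h1 := Int.ediv_add_emod (-a) b
  have h2 := Int.ediv_add_emod (a+b-1) b
  have h3 := Int.emod_nonneg (-a) (by omega : b ≠ 0)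
  have h4 := Int.emod_lt_of_pos (-a) hb
  have h5 := Int.emod_nonneg (a+b-1) (by omega : b ≠ 0)
  have h6 := Int.emod_lt_of_pos (a+b-1) hb
  set q1 := (-a)/b with hq1; set q2 := (a+b-1)/b with hq2
  have hsum : b * (q2 + q1) = b - 1 - (a+b-1)%b - (-a)%b := by
    have := mul_add b q2 q1; omega
  have hu : q2 + q1 < 1 := by
    have : b * (q2+q1) < b * 1 := by omega
    exact lt_of_mul_lt_mul_left this hb.le
  have hl : -1 < q2 + q1 := by
    have : b * (-1) < b * (q2+q1) := by omega
    exact lt_of_mul_lt_mul_left this hb.le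
  omega

-- -((node - num_silos) // num_nodes) = len(range(node, num_silos, num_nodes)).
theorem m_eq_len (num_silos num_nodes node : Int) (hn : 0 < num_nodes)
    (hlt : node < num_silos) :
    -(PySem.Int.floordiv (node - num_silos) num_nodes)
      = ((PySem.List.pyRange node num_silos num_nodes).length : Int) := by
  rw [PySem.Int.floordiv_eq_ediv_of_pos hn]
  rw [PySem.List.pyRange_of_pos _ _ hn, List.length_map, List.length_range, if_pos hlt]
  have h : node - num_silos = -(num_silos - node) := by ring
  rw [h, neg_ediv_neg_eq _ _ hn]
  have h2 : 0 ≤ (num_silos - node + num_nodes - 1)/num_nodes :=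
    Int.ediv_nonneg (by omega) hn.le
  omega

-- {i ∈ range(n) : i % P = loc} = [loc + j*P for j in range(-((loc - n) // P))].
theorem filter_mod_eq (n P loc : Int) (hP : 0 < P) (h0 : 0 ≤ loc) (hl : loc < P) :
    ((PySem.List.pyRange 0 n 1).filter (fun i => PySem.Int.mod i P == loc))
      = (PySem.List.pyRange 0 (-(PySem.Int.floordiv (loc - n) P)) 1).map (fun j => loc + j * P) := by
  apply eq_of_pairwise_lt_of_mem_iff
  · exact (PySem.List.pairwise_lt_pyRange_one 0 n).filter _
  · refine List.pairwise_map.mpr ((PySem.List.pairwise_lt_pyRange_one _ _).imp ?_)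
    intro a b hab
    have := mul_lt_mul_of_pos_right hab hP
    omega
  · intro x
    simp only [List.mem_filter, PySem.List.mem_pyRange_one, List.mem_map, beq_iff_eq,
      PySem.Int.mod_eq_emod_of_pos hP, PySem.Int.floordiv_eq_ediv_of_pos hP]
    constructor
    · rintro ⟨⟨hx0, hxn⟩, hmod⟩
      have hdec := Int.ediv_add_emod x P
      have hc : (x/P)*P = P*(x/P) := by ring
      refine ⟨x / P, ⟨Int.ediv_nonneg hx0 hP.le, ?_⟩, by omega⟩
      have hlt2 : loc - n < (-(x/P)) * P := by
        have h5 : (-(x/P)) * P = -((x/P)*P) := by ring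
        omega
      have := (Int.ediv_lt_iff_lt_mul hP (a := loc - n) (b := -(x/P))).mpr hlt2
      omega
    · rintro ⟨j, ⟨hj0, hjq⟩, hx⟩
      have hjP : 0 ≤ j * P := mul_nonneg hj0 hP.le
      have hr : (-j) * P = -(j * P) := by ring
      have hlt2 : loc - n < (-j) * P :=
        (Int.ediv_lt_iff_lt_mul hP (a := loc - n) (b := -j)).mp (by omega)
      have hxn : x < n := by omega
      refine ⟨⟨by omega, hxn⟩, ?_⟩
      rw [← hx, mul_comm j P, Int.add_mul_emod_self_left]
      exact Int.emod_eq_of_lt h0 hl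

-- The scatter's key stream [node*P + i % P : i < n] deduplicates to the key block
-- [node*P + loc : loc < P] and appends it after the (smaller) existing keys.
theorem update_keys_eq (P node n : Int) (hP : 0 < P) (hPn : P ≤ n)
    (keys : List Int) (hfresh : ∀ k ∈ keys, k < node * P) :
    PySem.Set.update keys ((PySem.List.pyRange 0 n 1).map (fun i => node * P + PySem.Int.mod i P))
      = keys ++ (PySem.List.pyRange 0 P 1).map (fun loc => node * P + loc) := by
  have hblock : ((PySem.List.pyRange 0 P 1).map (fun loc => node * P + loc)).Nodup :=
    (PySem.List.nodup_pyRange_one 0 P).map (fun a b h => by omega)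
  have hofL : PySem.Set.ofList ((PySem.List.pyRange 0 n 1).map (fun i => node * P + PySem.Int.mod i P))
      = (PySem.List.pyRange 0 P 1).map (fun loc => node * P + loc) := by
    rw [PySem.List.pyRange_one_append 0 P n hP.le hPn, List.map_append, PySem.Set.ofList_append]
    have h1 : (PySem.List.pyRange 0 P 1).map (fun i => node * P + PySem.Int.mod i P)
        = (PySem.List.pyRange 0 P 1).map (fun loc => node * P + loc) := by
      apply List.map_congr_left; intro a ha
      rw [PySem.List.mem_pyRange_one] at ha
      rw [PySem.Int.mod_eq_emod_of_pos hP, Int.emod_eq_of_lt ha.1 ha.2]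
    rw [h1, PySem.Set.ofList_eq_self_of_nodup _ hblock]
    rw [PySem.Set.update_eq_append_filter]
    have h2 : ((PySem.Set.ofList ((PySem.List.pyRange P n 1).map (fun i => node * P + PySem.Int.mod i P))).filter
        (fun y => !(PySem.Set.contains ((PySem.List.pyRange 0 P 1).map (fun loc => node * P + loc)) y))) = [] := by
      apply List.filter_eq_nil_iff.mpr
      intro y hy
      rw [PySem.Set.mem_ofList] at hy
      obtain ⟨i, hi, rfl⟩ := List.mem_map.mp hy
      have hmem : node * P + PySem.Int.mod i P ∈ (PySem.List.pyRange 0 P 1).map (fun loc => node * P + loc) :=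
        List.mem_map.mpr ⟨PySem.Int.mod i P,
          by rw [PySem.List.mem_pyRange_one]; exact ⟨PySem.Int.mod_nonneg _ hP, PySem.Int.mod_lt _ hP⟩, rfl⟩
      simp [hmem]
    rw [h2, List.append_nil]
  rw [PySem.Set.update_eq_append_filter, hofL]
  congr 1
  apply List.filter_eq_self.mpr
  intro y hy
  obtain ⟨loc, hloc, rfl⟩ := List.mem_map.mp hy
  rw [PySem.List.mem_pyRange_one] at hloc
  have hnot : node * P + loc ∉ keys := fun hmem => absurd (hfresh _ hmem) (by omega)
  simp [hnot]

-- B's gather step appends the node's key block with its closed-form silo lists.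
theorem stepB_items (num_silos num_nodes P node : Int) (hP : 0 < P)
    (d : PySem.Dict Int (List Int))
    (hfresh : ∀ k ∈ d.keys, k < node * P) :
    (pvStepB num_silos num_nodes P d node).items
      = d.items ++ (PySem.List.pyRange 0 P 1).map (fun loc => (node * P + loc,
          (PySem.List.pyRange 0 (-(PySem.Int.floordiv (loc - max (-(PySem.Int.floordiv (node - num_silos) num_nodes)) P) P)) 1).map
            (fun j => node + (PySem.Int.mod (loc + j * P) (-(PySem.Int.floordiv (node - num_silos) num_nodes))) * num_nodes))) := by
  unfold pvStepB
  refine PySem.Dict.items_foldl_insert_fresh _ _ _ d ?_ ?_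
  · intro a ha
    rw [PySem.List.mem_pyRange_one] at ha
    rw [← Bool.not_eq_true, PySem.Dict.contains_iff_mem_keys]
    intro hmem
    have := hfresh _ hmem
    omega
  · exact (PySem.List.nodup_pyRange_one 0 P).map (fun a b h => by omega)

-- A's scatter step equals the same appended key block (same values, gathered).
theorem stepA_items (num_silos num_nodes P node : Int) (hn : 0 < num_nodes)
    (hns : num_nodes ≤ num_silos) (hP : 0 < P) (h0 : 0 ≤ node) (h1 : node < num_nodes)
    (d : PySem.Dict Int (List Int)) (hnd : d.keys.Nodup)
    (hfresh : ∀ k ∈ d.keys, k < node * P) :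
    (pvStepA num_silos num_nodes P d node).items
      = d.items ++ (PySem.List.pyRange 0 P 1).map (fun loc => (node * P + loc,
          (PySem.List.pyRange 0 (-(PySem.Int.floordiv (loc - max (-(PySem.Int.floordiv (node - num_silos) num_nodes)) P) P)) 1).map
            (fun j => node + (PySem.Int.mod (loc + j * P) (-(PySem.Int.floordiv (node - num_silos) num_nodes))) * num_nodes))) := by
  have hns' : node < num_silos := lt_of_lt_of_le h1 hns
  have hm : -(PySem.Int.floordiv (node - num_silos) num_nodes)
      = ((PySem.List.pyRange node num_silos num_nodes).length : Int) := m_eq_len _ _ _ hn hns'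
  unfold pvStepA
  simp only []
  rw [if_neg (not_le.mpr hn)]
  rw [bucket_eq num_silos num_nodes node hn h0 h1]
  rw [hm]
  set silos := PySem.List.pyRange node num_silos num_nodes with hsil
  have hmemn : node ∈ silos := by
    rw [hsil, PySem.List.mem_pyRange_iff_of_pos hn]
    exact ⟨le_refl _, hns', ⟨0, by ring⟩⟩
  have hne : silos ≠ [] := List.ne_nil_of_mem hmemn
  have hlen : 0 < silos.length := List.length_pos_iff.mpr hne
  rw [List.isEmpty_eq_false_iff.mpr hne]
  rw [decide_eq_false (not_le.mpr hP)]
  simp only [Bool.or_self, Bool.false_eq_true, if_false]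
  set L : Int := (silos.length : Int) with hL
  set n : Int := max L P with hn2
  have hPn : P ≤ n := le_max_right _ _
  -- turn the scatter into a fold over explicit (key, value) pairs
  have hfold : ∀ (l : List (Int × Int)) (init : PySem.Dict Int (List Int)),
      l.foldl (fun d q => d.modify (node * P + q.2) [] (fun s => s ++ [q.1])) init
        = (l.map (fun q => (node * P + q.2, q.1))).foldl
            (fun d p => d.modify p.1 [] (fun s => s ++ [p.2])) init :=
    fun l init => (List.foldl_map (f := fun q : Int × Int => (node * P + q.2, q.1))
      (g := fun (d : PySem.Dict Int (List Int)) (p : Int × Int) => d.modify p.1 [] (fun s => s ++ [p.2]))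
      (l := l) (init := init)).symm
  rw [hfold, List.map_map]
  set F : Int → Int × Int := (fun q : Int × Int => (node * P + q.2, q.1)) ∘
    (fun i => ((PySem.List.pyGet? silos (PySem.Int.mod i L)).getD 0, PySem.Int.mod i P)) with hF
  have hF1 : ∀ i, (F i).1 = node * P + PySem.Int.mod i P := fun i => rfl
  have hF2 : ∀ i, (F i).2 = (PySem.List.pyGet? silos (PySem.Int.mod i L)).getD 0 := fun i => rfl
  have hnodK : (((PySem.List.pyRange 0 n 1).map F).foldl
      (fun d p => d.modify p.1 [] (fun s => s ++ [p.2])) d).keys.Nodup :=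
    PySem.Dict.nodup_keys_foldl_modify_key _ Prod.fst [] (fun _ p => (fun s => s ++ [p.2])) d hnd
  rw [PySem.Dict.items_eq_map_keys _ hnodK []]
  rw [PySem.Dict.keys_foldl_modify_key _ Prod.fst [] (fun _ p => (fun s => s ++ [p.2]))]
  have hkeymap : ((PySem.List.pyRange 0 n 1).map F).map Prod.fst
      = (PySem.List.pyRange 0 n 1).map (fun i => node * P + PySem.Int.mod i P) := by
    rw [List.map_map]; rfl
  rw [hkeymap, update_keys_eq P node n hP hPn d.keys hfresh, List.map_append]
  congr 1
  · -- existing keys keep their values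
    rw [PySem.Dict.items_eq_map_keys d hnd []]
    apply List.map_congr_left
    intro k hk
    have hfilter : ((PySem.List.pyRange 0 n 1).map F).filter (fun p => p.1 == k) = [] := by
      apply List.filter_eq_nil_iff.mpr
      intro p hp
      obtain ⟨i, hi, rfl⟩ := List.mem_map.mp hp
      have hk2 := hfresh k hk
      have hmn : 0 ≤ PySem.Int.mod i P := PySem.Int.mod_nonneg _ hP
      rw [hF1]
      simp only [beq_iff_eq]
      omega
    rw [PySem.Dict.getD_foldl_modify_append, hfilter]
    simp
  · -- the new block: gather each process's values
    rw [List.map_map]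
    apply List.map_congr_left
    intro loc hloc
    rw [PySem.List.mem_pyRange_one] at hloc
    simp only [Function.comp_def]
    have hcont : d.contains (node * P + loc) = false := by
      rw [← Bool.not_eq_true, PySem.Dict.contains_iff_mem_keys]
      intro hmem
      have := hfresh _ hmem
      omega
    rw [PySem.Dict.getD_foldl_modify_append, PySem.Dict.getD_of_not_contains _ _ hcont,
      List.nil_append]
    congr 1
    rw [List.filter_map]
    have hpred : ∀ i ∈ PySem.List.pyRange 0 n 1,
        ((fun p : Int × Int => p.1 == node * P + loc) ∘ F) i = (PySem.Int.mod i P == loc) := by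
      intro i _
      simp only [Function.comp_def, hF1]
      by_cases h : PySem.Int.mod i P = loc
      · simp [h]
      · have hne2 : node * P + PySem.Int.mod i P ≠ node * P + loc := by omega
        simp [h, hne2]
    rw [List.filter_congr hpred, filter_mod_eq n P loc hP hloc.1 hloc.2, List.map_map,
      List.map_map]
    apply List.map_congr_left
    intro j hj
    rw [PySem.List.mem_pyRange_one] at hj
    simp only [Function.comp_def, hF2]
    set x : Int := loc + j * P with hx
    have ht0 : 0 ≤ PySem.Int.mod x L := PySem.Int.mod_nonneg _ (by omega)
    have htL : PySem.Int.mod x L < L := PySem.Int.mod_lt _ (by omega)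
    set t : Int := PySem.Int.mod x L with ht
    have htn : t.toNat < silos.length := by omega
    rw [PySem.List.pyGet?_of_nonneg _ ht0, List.getElem?_eq_getElem htn]
    have hval : silos[t.toNat] = node + num_nodes * (t.toNat : Int) := by
      simp only [hsil, PySem.List.pyRange_of_pos node num_silos hn, List.getElem_map,
        List.getElem_range]
    rw [Option.getD_some, hval, Int.toNat_of_nonneg ht0, mul_comm]

-- One node: scatter = gather.
theorem step_eq (num_silos num_nodes P node : Int) (hn : 0 < num_nodes)
    (hns : num_nodes ≤ num_silos) (hP : 0 < P) (h0 : 0 ≤ node) (h1 : node < num_nodes)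
    (d : PySem.Dict Int (List Int)) (hnd : d.keys.Nodup)
    (hfresh : ∀ k ∈ d.keys, k < node * P) :
    pvStepA num_silos num_nodes P d node = pvStepB num_silos num_nodes P d node := by
  apply PySem.Dict.ext
  rw [stepA_items num_silos num_nodes P node hn hns hP h0 h1 d hnd hfresh,
    stepB_items num_silos num_nodes P node hP d hfresh]

-- keys of the gather step.
theorem stepB_keys (num_silos num_nodes P node : Int) (hP : 0 < P)
    (d : PySem.Dict Int (List Int))
    (hfresh : ∀ k ∈ d.keys, k < node * P) :
    (pvStepB num_silos num_nodes P d node).keys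
      = d.keys ++ (PySem.List.pyRange 0 P 1).map (fun loc => node * P + loc) := by
  show (pvStepB num_silos num_nodes P d node).items.map Prod.fst = _
  rw [stepB_items num_silos num_nodes P node hP d hfresh, List.map_append, List.map_map]
  rfl

-- The whole loop: processing increasing fresh nodes with either step gives the same dict.
theorem fold_eq (num_silos num_nodes P : Int) (hn : 0 < num_nodes)
    (hns : num_nodes ≤ num_silos) (hP : 0 < P) :
    ∀ (nodes : List Int) (d : PySem.Dict Int (List Int)),
    d.keys.Nodup →
    (∀ k ∈ d.keys, ∀ nd ∈ nodes, k < nd * P) →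
    nodes.Pairwise (· < ·) →
    (∀ nd ∈ nodes, 0 ≤ nd ∧ nd < num_nodes) →
    nodes.foldl (pvStepA num_silos num_nodes P) d = nodes.foldl (pvStepB num_silos num_nodes P) d := by
  intro nodes
  induction nodes with
  | nil => intros; rfl
  | cons nd nodes ih =>
    intro d hnd hfresh hpw hrange
    simp only [List.foldl_cons]
    have h0 : 0 ≤ nd := (hrange nd (by simp)).1
    have h1 : nd < num_nodes := (hrange nd (by simp)).2
    have hfr : ∀ k ∈ d.keys, k < nd * P := fun k hk => hfresh k hk nd (by simp)
    rw [step_eq num_silos num_nodes P nd hn hns hP h0 h1 d hnd hfr]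
    have hkeys := stepB_keys num_silos num_nodes P nd hP d hfr
    rcases hpw with _ | ⟨hhd, hpw'⟩
    apply ih
    · rw [hkeys]
      refine List.Nodup.append hnd
        ((PySem.List.nodup_pyRange_one 0 P).map (fun a b h => by omega)) ?_
      intro k hk1 hk2
      obtain ⟨loc, hloc, rfl⟩ := List.mem_map.mp hk2
      rw [PySem.List.mem_pyRange_one] at hloc
      have := hfr _ hk1
      omega
    · intro k hk nd' hnd'
      have hlt : nd < nd' := hhd nd' hnd'
      rw [hkeys] at hk
      rcases List.mem_append.mp hk with hk | hk
      · exact hfresh k hk nd' (List.mem_cons_of_mem _ hnd')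
      · obtain ⟨loc, hloc, rfl⟩ := List.mem_map.mp hk
        rw [PySem.List.mem_pyRange_one] at hloc
        have hmul : (nd + 1) * P ≤ nd' * P :=
          mul_le_mul_of_nonneg_right (by omega) hP.le
        have : (nd + 1) * P = nd * P + P := by ring
        omega
    · exact hpw'
    · exact fun nd' hnd' => hrange nd' (List.mem_cons_of_mem _ hnd')

-- ===== VERDICT (by name: the statement is the Claim_ definition above) =====
theorem assign_silo_to_process_spec : Claim_equal_assign_silo_to_process := by
  intro num_silos num_nodes num_local_processes _ hpre
  unfold Pre_assign_silo_to_process at hpre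
  obtain ⟨hns, -⟩ := hpre
  unfold Spec_assign_silo_to_process
  rw [portA_eq, portB_eq]
  by_cases hn : num_nodes ≤ 0
  · rw [PySem.List.pyRange_one_eq_nil hn]; rfl
  · rw [not_le] at hn
    by_cases hP : num_local_processes ≤ 0
    · -- no local processes: both steps leave the dict unchanged
      congr 1
      apply PySem.List.foldl_congr_mem
      intro acc node _
      show pvStepA num_silos num_nodes num_local_processes acc node
        = pvStepB num_silos num_nodes num_local_processes acc node
      unfold pvStepA pvStepB
      simp [hP, PySem.List.pyRange_one_eq_nil hP]
    · rw [not_le] at hP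
      congr 1
      apply fold_eq num_silos num_nodes num_local_processes hn hns hP
        (PySem.List.pyRange 0 num_nodes 1) PySem.Dict.empty
      · simp [PySem.Dict.keys_empty]
      · simp [PySem.Dict.keys_empty]
      · exact PySem.List.pairwise_lt_pyRange_one 0 num_nodes
      · intro nd hnd
        rw [PySem.List.mem_pyRange_one] at hnd
        exact hnd
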